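-- pv_equiv track=rewrite | github.com/KyleSpicer/advent_of_code | 2021/day3/day3.py | calculate_epsilon_rate
-- ===== SOURCE A (Python) =====
-- def calculate_epsilon_rate(data):
--     e_rate = ""
--     curr_pos = 0
--     cols = len(data[0])
--
--     while curr_pos < cols:
--         ones = 0
--         zeros = 0
--
--         for rate in data:
--             num = int(rate[curr_pos])
--             if 0 == num:
--                 zeros += 1
--             else:
--                 ones += 1
--
--         if ones > zeros:
--             e_rate = f"{e_rate}0"
--         else:
--             e_rate = f"{e_rate}1"
--
--         curr_pos += 1
--
--     return int(e_rate, 2)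
-- ===== SOURCE B (Python) =====
-- def calculate_epsilon_rate(data):
--     rows = len(data)
--     cols = len(data[0])
--     counts = [0] * cols
--     for row in data:
--         counts = [c + (1 if int(ch) != 0 else 0) for c, ch in zip(counts, row)]
--     bits = ''.join('0' if ones > rows - ones else '1' for ones in counts)
--     return int(bits, 2)
-- ===== Notes on version B (the rewrite author's own statement) =====
-- stated objective: alternative
-- what changed: Replaces A's column-outer/row-inner double scan (re-reading all rows once per column) by a single pass over the rows that maintains a per-column ones-count table, then builds the bit string from the table.
import Mathlib
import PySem

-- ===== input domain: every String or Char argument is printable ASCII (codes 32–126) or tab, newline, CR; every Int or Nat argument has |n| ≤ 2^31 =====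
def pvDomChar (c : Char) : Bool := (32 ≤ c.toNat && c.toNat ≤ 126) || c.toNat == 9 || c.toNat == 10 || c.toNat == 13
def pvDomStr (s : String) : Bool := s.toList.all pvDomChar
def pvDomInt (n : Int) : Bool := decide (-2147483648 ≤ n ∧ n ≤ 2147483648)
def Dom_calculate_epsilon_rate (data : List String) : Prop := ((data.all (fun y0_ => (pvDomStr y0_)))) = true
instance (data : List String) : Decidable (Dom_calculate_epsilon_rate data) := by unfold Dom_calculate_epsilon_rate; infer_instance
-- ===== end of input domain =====

-- B replaces A's column-outer/row-inner double scan by one pass over the rows that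
-- maintains a per-column ones-count table, then builds the bit string from the table
-- (alternative decomposition, same asymptotic cost). Equivalence proved on Pre_.

-- ===== PORT A =====
-- int(ch) for a single character; the default 0 is never reached under Pre_ (ValueError excluded).
def chNum (ch : Char) : Int := (PySem.Int.ofChars? [ch]).getD 0

-- A's inner `for rate in data` loop: count ones and zeros in column curr_pos.
def countCol (data : List String) (curr_pos : Int) : Int × Int :=
  data.foldl (fun (oz : Int × Int) rate =>
    let num := chNum ((PySem.Str.pyGet? rate curr_pos).getD '0')
    if (0 : Int) = num then (oz.1, oz.2 + 1) else (oz.1 + 1, oz.2)) ((0 : Int), (0 : Int))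

def calculate_epsilon_rate (data : List String) : Int :=
  let cols : Int := PySem.Str.len ((PySem.List.pyGet? data 0).getD "")
  let e_rate : List Char :=
    (PySem.List.pyRange 0 cols 1).foldl (fun e_rate curr_pos =>
      let oz := countCol data curr_pos
      if oz.1 > oz.2 then e_rate ++ ['0'] else e_rate ++ ['1']) []
  (PySem.Int.ofCharsBase? e_rate 2).getD 0

-- ===== PORT B =====
-- B's per-row update of the ones-count table (the zip comprehension in Source B).
def updCounts (counts : List Int) (row : String) : List Int :=
  List.zipWith (fun c ch => c + if chNum ch ≠ 0 then 1 else 0) counts row.toList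

def calculate_epsilon_rate_alt (data : List String) : Int :=
  let rows : Int := data.length
  let cols : Int := PySem.Str.len ((PySem.List.pyGet? data 0).getD "")
  let counts : List Int := data.foldl updCounts (List.replicate cols.toNat 0)
  let bits : List Char := counts.map (fun ones => if ones > rows - ones then '0' else '1')
  (PySem.Int.ofCharsBase? bits 2).getD 0

-- ===== PRECONDITION & SPEC =====
-- Pre_ excludes exactly the inputs on which Python A raises: empty data (IndexError),
-- an empty first row (ValueError from int('', 2)), a row shorter than the first row
-- (IndexError), and a non-digit character in a scanned column (ValueError).
def Pre_calculate_epsilon_rate (data : List String) : Prop :=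
  data ≠ [] ∧ 0 < (data.headD "").toList.length ∧
  ∀ s ∈ data, (data.headD "").toList.length ≤ s.toList.length ∧
    ((s.toList.take (data.headD "").toList.length).all Char.isDigit) = true
instance (data : List String) : Decidable (Pre_calculate_epsilon_rate data) := by
  unfold Pre_calculate_epsilon_rate; infer_instance

def pvWitness_calculate_epsilon_rate : List String := ["10", "01", "11"]

def Spec_calculate_epsilon_rate (data : List String) (out : Int) : Prop := out = calculate_epsilon_rate_alt data
instance (data : List String) (out : Int) : Decidable (Spec_calculate_epsilon_rate data out) := by unfold Spec_calculate_epsilon_rate; infer_instance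

-- ===== CLAIM (what is proved, stated in full; the proofs are below) =====
def Claim_equal_calculate_epsilon_rate : Prop := ∀ (data : List String), Dom_calculate_epsilon_rate data → Pre_calculate_epsilon_rate data → Spec_calculate_epsilon_rate data (calculate_epsilon_rate data)

-- ===== LEMMAS AND PROOFS =====

-- #rows whose k-th char has nonzero / zero digit value.
def colOnes (data : List String) (k : Nat) : Int :=
  (data.map (fun s => if (0 : Int) = chNum (s.toList.getD k '0') then 0 else 1)).sum
def colZeros (data : List String) (k : Nat) : Int :=
  (data.map (fun s => if (0 : Int) = chNum (s.toList.getD k '0') then 1 else 0)).sum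

theorem colOnes_add_colZeros (data : List String) (k : Nat) :
    colOnes data k + colZeros data k = (data.length : Int) := by
  induction data with
  | nil => simp [colOnes, colZeros]
  | cons s tl ih =>
    simp only [colOnes, colZeros, List.map_cons, List.sum_cons, List.length_cons] at *
    split <;> push_cast <;> omega

theorem countCol_aux (data : List String) (k : Nat)
    (hlen : ∀ s ∈ data, k < s.toList.length) (a b : Int) :
    data.foldl (fun (oz : Int × Int) rate =>
        let num := chNum ((PySem.Str.pyGet? rate (k : Int)).getD '0')
        if (0 : Int) = num then (oz.1, oz.2 + 1) else (oz.1 + 1, oz.2)) (a, b)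
      = (a + colOnes data k, b + colZeros data k) := by
  induction data generalizing a b with
  | nil => simp [colOnes, colZeros]
  | cons s tl ih =>
    have hs : k < s.toList.length := hlen s (by simp)
    have hget : (PySem.Str.pyGet? s (k : Int)).getD '0' = s.toList.getD k '0' := by
      simp [List.getD_eq_getElem?_getD]
    simp only [List.foldl_cons, colOnes, colZeros, List.map_cons, List.sum_cons, hget]
    split
    · rw [ih (fun s hs => hlen s (by simp [hs]))]
      simp only [colOnes, colZeros, Prod.mk.injEq]
      constructor <;> ring
    · rw [ih (fun s hs => hlen s (by simp [hs]))]
      simp only [colOnes, colZeros, Prod.mk.injEq]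
      constructor <;> ring

theorem countCol_eq (data : List String) (k : Nat)
    (hlen : ∀ s ∈ data, k < s.toList.length) :
    countCol data (k : Int) = (colOnes data k, colZeros data k) := by
  unfold countCol
  rw [countCol_aux data k hlen 0 0]
  simp

theorem updCounts_length (cs : List Int) (s : String) (hs : cs.length ≤ s.toList.length) :
    (updCounts cs s).length = cs.length := by
  have hs' : cs.length ≤ s.length := by simpa using hs
  simp [updCounts]
  omega

theorem foldB_length (data : List String) (cs : List Int)
    (hlen : ∀ s ∈ data, cs.length ≤ s.toList.length) :
    (data.foldl updCounts cs).length = cs.length := by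
  induction data generalizing cs with
  | nil => rfl
  | cons s tl ih =>
    have hs : cs.length ≤ s.toList.length := hlen s (by simp)
    have hzl := updCounts_length cs s hs
    rw [List.foldl_cons, ih (updCounts cs s) ?_, hzl]
    intro t ht
    rw [hzl]
    exact (hlen t (by simp [ht]))

theorem updCounts_getD (cs : List Int) (s : String) (k : Nat) (hk : k < cs.length)
    (hs : cs.length ≤ s.toList.length) :
    (updCounts cs s).getD k 0
      = cs.getD k 0 + if chNum (s.toList.getD k '0') ≠ 0 then 1 else 0 := by
  have hk' : k < s.toList.length := lt_of_lt_of_le hk hs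
  have hkz : k < (updCounts cs s).length := by rw [updCounts_length cs s hs]; exact hk
  rw [List.getD_eq_getElem _ _ hkz, List.getD_eq_getElem _ _ hk, List.getD_eq_getElem _ _ hk']
  simp [updCounts]

theorem foldB_getD (data : List String) (cs : List Int) (k : Nat) (hk : k < cs.length)
    (hlen : ∀ s ∈ data, cs.length ≤ s.toList.length) :
    (data.foldl updCounts cs).getD k 0 = cs.getD k 0 + colOnes data k := by
  induction data generalizing cs with
  | nil => simp [colOnes]
  | cons s tl ih =>
    have hs : cs.length ≤ s.toList.length := hlen s (by simp)
    have hzl := updCounts_length cs s hs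
    rw [List.foldl_cons, ih (updCounts cs s) (by omega) ?_]
    · rw [updCounts_getD cs s k hk hs]
      simp only [colOnes, List.map_cons, List.sum_cons]
      split_ifs with h1 h2 <;> omega
    · intro t ht
      rw [hzl]
      exact hlen t (by simp [ht])

theorem stepA_eq (data : List String) (k : Nat)
    (hlen : ∀ s ∈ data, k < s.toList.length) (s : List Char) :
    (let oz := countCol data (k : Int)
     if oz.1 > oz.2 then s ++ ['0'] else s ++ ['1'])
      = s ++ [if colOnes data k > colZeros data k then '0' else '1'] := by
  have h := countCol_eq data k hlen
  simp only [h]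
  split <;> rfl

-- ===== VERDICT (by name: the statement is the Claim_ definition above) =====
theorem calculate_epsilon_rate_spec : Claim_equal_calculate_epsilon_rate := by
  intro data _ hpre
  obtain ⟨hne, _, hrows⟩ := hpre
  obtain ⟨d, tl, rfl⟩ := List.exists_cons_of_ne_nil hne
  unfold Spec_calculate_epsilon_rate calculate_epsilon_rate calculate_epsilon_rate_alt
  simp only [PySem.List.pyGet?_zero_cons, Option.getD_some, PySem.Str.len_eq, List.headD_cons] at *
  set data := d :: tl with hdata
  set cols := d.toList.length with hcols
  have hcolslen : ∀ s ∈ data, cols ≤ s.toList.length := fun s hs => (hrows s hs).1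
  -- A's bit string
  have hA : (PySem.List.pyRange 0 (cols : Int) 1).foldl (fun e_rate curr_pos =>
      let oz := countCol data curr_pos
      if oz.1 > oz.2 then e_rate ++ ['0'] else e_rate ++ ['1']) []
      = (List.range cols).map (fun k =>
          if colOnes data k > colZeros data k then '0' else '1') := by
    rw [PySem.List.pyRange_zero_nat, List.foldl_map]
    have main : ∀ (ks : List Nat) (init : List Char), (∀ k ∈ ks, k < cols) →
        ks.foldl (fun e_rate (k : Nat) =>
          let oz := countCol data ((k : Nat) : Int)
          if oz.1 > oz.2 then e_rate ++ ['0'] else e_rate ++ ['1']) init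
        = init ++ ks.map (fun k => if colOnes data k > colZeros data k then '0' else '1') := by
      intro ks
      induction ks with
      | nil => simp
      | cons k ks ih =>
        intro init hks
        have hk : k < cols := hks k (by simp)
        rw [List.foldl_cons, ih _ (fun j hj => hks j (by simp [hj])), List.map_cons]
        rw [stepA_eq data k (fun s hs => lt_of_lt_of_le hk (hcolslen s hs))]
        simp
    rw [main (List.range cols) [] (by simp)]
    simp
  rw [hA]
  -- B's ones-count table
  have hlenrep : ∀ s ∈ data, (List.replicate ((cols : Int)).toNat (0 : Int)).length ≤ s.toList.length := by
    intro s hs; simpa using hcolslen s hs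
  have hBlen := foldB_length data (List.replicate ((cols : Int)).toNat 0) hlenrep
  have hcounts : data.foldl updCounts (List.replicate ((cols : Int)).toNat 0)
      = (List.range cols).map (fun k => colOnes data k) := by
    apply List.ext_getElem
    · rw [hBlen]; simp
    · intro k h1 h2
      have hk : k < cols := by simpa using h2
      rw [← List.getD_eq_getElem _ 0 h1,
        foldB_getD data _ k (by simpa using hk) hlenrep]
      simp [hk]
  rw [hcounts, List.map_map]
  have hmaps : (List.range cols).map (fun k => if colOnes data k > colZeros data k then '0' else '1')
      = (List.range cols).map ((fun ones => if ones > (data.length : Int) - ones then '0' else '1') ∘ fun k => colOnes data k) := by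
    apply List.map_congr_left
    intro k _
    have hsum := colOnes_add_colZeros data k
    simp only [Function.comp]
    refine if_congr ?_ rfl rfl
    constructor <;> intro <;> omega
  rw [hmaps]
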